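-- pv_equiv track=rewrite | github.com/s16173760/m_flow | m_flow/retrieval/time/query_time_parser.py | _remove_positions
-- ===== SOURCE A (Python) =====
-- from typing import List, Optional, Tuple
--
-- def _remove_positions(text: str, positions: List[Tuple[int, int]]) -> str:
--     """Remove specified positions from text."""
--     if not positions:
--         return text
--
--     # Sort by start position
--     positions = sorted(positions, key=lambda x: x[0])
--
--     result = []
--     last_end = 0
--     for start, end in positions:
--         if start > last_end:
--             result.append(text[last_end:start])
--         last_end = max(last_end, end)
--
--     if last_end < len(text):
--         result.append(text[last_end:])
--
--     return "".join(result)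
-- ===== SOURCE B (Python) =====
-- def _remove_positions(text, positions):
--     """Remove specified positions from text."""
--     removed = set()
--     n = len(text)
--     for s, e in positions:
--         removed.update(range(max(s, 0), min(e, n)))
--     return "".join(c for i, c in enumerate(text) if i not in removed)
-- ===== Notes on version B (the rewrite author's own statement) =====
-- stated objective: alternative
-- what changed: B drops A's sort and interval-merge sweep entirely: it builds a set of removed character indices (each interval clamped to the text) and keeps every character whose index is not in the set.
-- intended difference: On inputs containing a reversed interval (s,e) with e < s whose region up to min(s,len(text)) is not covered by any earlier-starting interval, A emits the characters in [max(e, previous ends), min(s,len(text))) twice (its running cursor moves backwards), while B returns the text with exactly the union of the intervals removed, which is the intended behaviour. — e.g. on _remove_positions("abc", [(2, 1)]): A returns "abbc", B returns "abc"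
import Mathlib
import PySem

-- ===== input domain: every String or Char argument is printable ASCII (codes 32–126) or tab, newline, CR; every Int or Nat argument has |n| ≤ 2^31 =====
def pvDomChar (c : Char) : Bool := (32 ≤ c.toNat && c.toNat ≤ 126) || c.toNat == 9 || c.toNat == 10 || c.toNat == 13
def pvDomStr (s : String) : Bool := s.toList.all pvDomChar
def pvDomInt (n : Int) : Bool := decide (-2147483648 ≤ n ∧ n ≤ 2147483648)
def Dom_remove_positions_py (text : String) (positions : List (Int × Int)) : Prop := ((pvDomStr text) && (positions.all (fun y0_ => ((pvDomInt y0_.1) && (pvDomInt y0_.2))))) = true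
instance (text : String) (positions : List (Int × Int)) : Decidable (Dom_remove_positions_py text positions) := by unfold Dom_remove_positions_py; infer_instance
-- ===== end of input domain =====

-- B replaces A's sort-and-merge sweep by a removed-index set (clamped ranges) and an indexed
-- filter of the text; objective: alternative (same order of cost). On inputs with a reversed
-- interval (end < start) that A's backward-moving cursor reaches, A duplicates characters and
-- B returns the text minus the union of the intervals (stated as the intended difference D_).


-- ===== PORT A =====
-- Python slices of `text` are ported via PySem.List.slice on text.toList; "".join of the
-- collected slice strings is List.flatten of the collected char-lists (exact for string pieces).
def remove_positions_py (text : String) (positions : List (Int × Int)) : String :=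
  if positions = [] then text
  else
    let ts := text.toList
    let pos := PySem.List.sorted positions (fun x => x.1) false
    let st := pos.foldl (fun (acc : List (List Char) × Int) p =>
        (if p.1 > acc.2 then acc.1 ++ [PySem.List.slice ts (some acc.2) (some p.1)] else acc.1,
         max acc.2 p.2)) ([], 0)
    let res := if st.2 < (ts.length : Int) then st.1 ++ [PySem.List.slice ts (some st.2) none] else st.1
    String.ofList res.flatten

-- ===== PORT B =====
-- removed = set(); removed.update(range(max(s,0), min(e,n))) per interval; then
-- "".join(c for i, c in enumerate(text) if i not in removed).
def remove_positions_py_alt (text : String) (positions : List (Int × Int)) : String :=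
  let ts := text.toList
  let n : Int := (ts.length : Int)
  let removed : PySem.Set Int := positions.foldl
    (fun st p => PySem.Set.update st (PySem.List.pyRange (max p.1 0) (min p.2 n))) PySem.Set.empty
  String.ofList ((PySem.List.enumerate ts).filterMap
    (fun ic => if PySem.Set.contains removed ic.1 then none else some ic.2))

-- ===== PRECONDITION & SPEC =====
-- On inputs containing a reversed interval (s,e), e < s, that is the first interval with its
-- start value and whose end — and every end of an interval starting earlier — lies strictly
-- below min(s, len(text)), A's cursor moves backwards and it returns text with the characters
-- in that window emitted twice; B returns the text minus the union of the intervals, the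
-- intended behaviour.
def D_remove_positions_py (text : String) (positions : List (Int × Int)) : Prop :=
  ∃ pi ∈ positions.zipIdx, (∀ qj ∈ positions.zipIdx, qj.2 < pi.2 → qj.1.1 ≠ pi.1.1) ∧
    max pi.1.2 (((positions.filter (fun q => decide (q.1 < pi.1.1))).map (fun q => q.2)).foldl max 0)
      < min pi.1.1 ((text.toList.length : Int))
instance (text : String) (positions : List (Int × Int)) : Decidable (D_remove_positions_py text positions) := by unfold D_remove_positions_py; infer_instance

def Spec_remove_positions_py (text : String) (positions : List (Int × Int)) (out : String) : Prop := ¬ D_remove_positions_py text positions → out = remove_positions_py_alt text positions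
instance (text : String) (positions : List (Int × Int)) (out : String) : Decidable (Spec_remove_positions_py text positions out) := by unfold Spec_remove_positions_py; infer_instance

def pvDiffWitness_remove_positions_py : String × (List (Int × Int)) := ("abc", [(2, 1)])
def pvDiffWitnessOut_remove_positions_py : String × String := ("abbc", "abc")

-- ===== CLAIM (what is proved, stated in full; the proofs are below) =====
def Claim_unchanged_remove_positions_py : Prop := ∀ (text : String) (positions : List (Int × Int)), Dom_remove_positions_py text positions → Spec_remove_positions_py text positions (remove_positions_py text positions)
def Claim_changed_remove_positions_py : Prop := Dom_remove_positions_py (pvDiffWitness_remove_positions_py.1) (pvDiffWitness_remove_positions_py.2) ∧ D_remove_positions_py (pvDiffWitness_remove_positions_py.1) (pvDiffWitness_remove_positions_py.2) ∧ remove_positions_py (pvDiffWitness_remove_positions_py.1) (pvDiffWitness_remove_positions_py.2) = pvDiffWitnessOut_remove_positions_py.1 ∧ remove_positions_py_alt (pvDiffWitness_remove_positions_py.1) (pvDiffWitness_remove_positions_py.2) = pvDiffWitnessOut_remove_positions_py.2 ∧ pvDiffWitnessOut_remove_positions_py.1 ≠ pvDiffWitnessOut_remove_positions_py.2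

-- ===== LEMMAS AND PROOFS =====

-- The pieces A's sweep emits, starting from cursor `le`.
def rpSpec (ts : List Char) : Int → List (Int × Int) → List Char
  | le, [] => ts.drop le.toNat
  | le, p :: rest =>
      (if le < p.1 then PySem.List.slice ts (some le) (some p.1) else []) ++ rpSpec ts (max le p.2) rest

-- whether some interval of L covers index i
def covB (L : List (Int × Int)) (i : Int) : Bool := L.any (fun p => decide (p.1 ≤ i) && decide (i < p.2))

-- indexed filter of a character list
def pvF (φ : Int → Bool) : Int → List Char → List Char
  | _, [] => []
  | i, c :: cs => (if φ i then [c] else []) ++ pvF φ (i + 1) cs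

-- "no duplication" along A's sweep
def pvND (n : Int) : Int → List (Int × Int) → Prop
  | _, [] => True
  | le, p :: r => (min p.1 n ≤ max le p.2) ∧ pvND n (max le p.2) r

def maxE (le : Int) (u : List (Int × Int)) : Int := u.foldl (fun a q => max a q.2) le

-- A's sweep computes rpSpec.
theorem rpA (ts : List Char) (sp : List (Int × Int)) :
    ∀ (res : List (List Char)) (le : Int), 0 ≤ le →
    (if (sp.foldl (fun (acc : List (List Char) × Int) p =>
        (if p.1 > acc.2 then acc.1 ++ [PySem.List.slice ts (some acc.2) (some p.1)] else acc.1,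
         max acc.2 p.2)) (res, le)).2 < (ts.length : Int)
     then (sp.foldl (fun (acc : List (List Char) × Int) p =>
        (if p.1 > acc.2 then acc.1 ++ [PySem.List.slice ts (some acc.2) (some p.1)] else acc.1,
         max acc.2 p.2)) (res, le)).1 ++ [PySem.List.slice ts (some (sp.foldl (fun (acc : List (List Char) × Int) p =>
        (if p.1 > acc.2 then acc.1 ++ [PySem.List.slice ts (some acc.2) (some p.1)] else acc.1,
         max acc.2 p.2)) (res, le)).2) none]
     else (sp.foldl (fun (acc : List (List Char) × Int) p =>
        (if p.1 > acc.2 then acc.1 ++ [PySem.List.slice ts (some acc.2) (some p.1)] else acc.1,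
         max acc.2 p.2)) (res, le)).1).flatten
    = res.flatten ++ rpSpec ts le sp := by
  induction sp with
  | nil =>
    intro res le hle
    simp only [List.foldl_nil, rpSpec]
    rw [PySem.List.slice_from ts hle]
    by_cases h : le < (ts.length : Int)
    · simp [h]
    · simp only [h, if_false]
      have hd : ts.length ≤ le.toNat := by omega
      simp [List.drop_eq_nil_of_le hd]
  | cons p rest ih =>
    intro res le hle
    simp only [List.foldl_cons, rpSpec]
    rw [ih _ (max le p.2) (le_trans hle (le_max_left _ _))]
    by_cases h : le < p.1
    · simp [h, List.flatten_append]
    · simp [h]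

theorem pvF_congr (φ ψ : Int → Bool) (ts : List Char) :
    ∀ (i₀ : Int), (∀ i, i₀ ≤ i → i < i₀ + ts.length → φ i = ψ i) → pvF φ i₀ ts = pvF ψ i₀ ts := by
  induction ts with
  | nil => intro i₀ h; rfl
  | cons c cs ih =>
    intro i₀ h
    simp only [pvF]
    rw [h i₀ le_rfl (by simp), ih (i₀+1) (fun i h1 h2 => h i (by omega) (by simp at h2 ⊢; omega))]

theorem pvF_nil (φ : Int → Bool) (ts : List Char) :
    ∀ (i₀ : Int), (∀ i, i₀ ≤ i → i < i₀ + ts.length → φ i = false) → pvF φ i₀ ts = [] := by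
  induction ts with
  | nil => intro i₀ h; rfl
  | cons c cs ih =>
    intro i₀ h
    simp only [pvF]
    rw [h i₀ le_rfl (by simp), ih (i₀+1) (fun i h1 h2 => h i (by omega) (by simp at h2 ⊢; omega))]
    rfl

theorem pvF_split (φ₁ φ₂ : Int → Bool) (c : Int) (ts : List Char)
    (h₁ : ∀ i, φ₁ i = true → i < c) (h₂ : ∀ i, φ₂ i = true → c ≤ i) :
    ∀ (i₀ : Int), pvF φ₁ i₀ ts ++ pvF φ₂ i₀ ts = pvF (fun i => φ₁ i || φ₂ i) i₀ ts := by
  induction ts with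
  | nil => intro i₀; rfl
  | cons ch cs ih =>
    intro i₀
    by_cases hp1 : φ₁ i₀ = true
    · have hp2 : φ₂ i₀ = false := by
        cases hq : φ₂ i₀
        · rfl
        · exact absurd (h₂ i₀ hq) (by have := h₁ i₀ hp1; omega)
      simp only [pvF, hp1, hp2, if_true, Bool.true_or, Bool.false_eq_true, if_false,
        List.nil_append, List.cons_append]
      rw [← ih (i₀+1)]
    · have hp1' : φ₁ i₀ = false := by simpa using hp1
      by_cases hp2 : φ₂ i₀ = true
      · have hnil : pvF φ₁ (i₀+1) cs = [] := by
          apply pvF_nil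
          intro i hi _
          cases hq : φ₁ i
          · rfl
          · exact absurd (h₁ i hq) (by have := h₂ i₀ hp2; omega)
        simp only [pvF, hp1', hp2, if_true, Bool.false_or, Bool.false_eq_true, if_false, hnil,
          List.nil_append, List.cons_append]
        congr 1
        apply pvF_congr
        intro i hi _
        cases hq : φ₁ i
        · simp
        · exact absurd (h₁ i hq) (by have := h₂ i₀ hp2; omega)
      · have hp2' : φ₂ i₀ = false := by simpa using hp2
        simp only [pvF, hp1', hp2', Bool.false_eq_true, if_false, Bool.false_or, List.nil_append]
        exact ih (i₀+1)

theorem pvF_window (ts : List Char) (a b : Int) :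
    ∀ (i₀ : Int), pvF (fun i => decide (a ≤ i) && decide (i < b)) i₀ ts
      = List.take ((b - max a i₀).toNat) (List.drop ((a - i₀).toNat) ts) := by
  induction ts with
  | nil => intro i₀; simp [pvF]
  | cons c cs ih =>
    intro i₀
    by_cases ha : a ≤ i₀
    · have hd : (a - i₀).toNat = 0 := by omega
      by_cases hb : i₀ < b
      · have : (b - max a i₀).toNat = ((b - max a (i₀+1)).toNat) + 1 := by
          rcases le_or_gt a (i₀+1) with h | h <;> omega
        simp only [pvF, ha, hb, decide_true, Bool.and_self, if_true, hd, List.drop_zero, this,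
          List.take_succ_cons, List.singleton_append]
        rw [ih (i₀+1)]
        have : (a - (i₀+1)).toNat = 0 := by omega
        rw [this, List.drop_zero]
      · have h0 : (b - max a i₀).toNat = 0 := by omega
        have hnil : pvF (fun i => decide (a ≤ i) && decide (i < b)) i₀ (c::cs) = [] := by
          apply pvF_nil
          intro i hi _
          simp only [Bool.and_eq_false_iff, decide_eq_false_iff_not]
          right; omega
        rw [hnil, h0, List.take_zero]
      -- done
    · have hne : ¬ (decide (a ≤ i₀) && decide (i₀ < b)) = true := by simp; omega
      simp only [pvF, if_neg hne, List.nil_append]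
      rw [ih (i₀+1)]
      have h1 : (a - i₀).toNat = (a - (i₀+1)).toNat + 1 := by omega
      have h2 : max a i₀ = max a (i₀+1) := by omega
      rw [h1, h2, List.drop_succ_cons]

theorem pvF_ge (ts : List Char) (a : Int) :
    ∀ (i₀ : Int), pvF (fun i => decide (a ≤ i)) i₀ ts = List.drop ((a - i₀).toNat) ts := by
  induction ts with
  | nil => intro i₀; simp [pvF]
  | cons c cs ih =>
    intro i₀
    by_cases ha : a ≤ i₀
    · have hall : pvF (fun i => decide (a ≤ i)) i₀ (c::cs) = c :: pvF (fun i => decide (a ≤ i)) (i₀+1) cs := by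
        simp [pvF, ha]
      rw [hall, ih (i₀+1)]
      have h1 : (a - i₀).toNat = 0 := by omega
      have h2 : (a - (i₀+1)).toNat = 0 := by omega
      simp [h1, h2]
    · simp only [pvF, decide_eq_true_eq, if_neg ha, List.nil_append]
      rw [ih (i₀+1)]
      have h1 : (a - i₀).toNat = (a - (i₀+1)).toNat + 1 := by omega
      rw [h1, List.drop_succ_cons]

theorem enum_filterMap (ts : List Char) (g : Int → Bool) :
    ∀ (i₀ : Int), (PySem.List.enumerate ts i₀).filterMap
      (fun ic => if g ic.1 then none else some ic.2) = pvF (fun i => !g i) i₀ ts := by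
  induction ts with
  | nil => intro i₀; rfl
  | cons c cs ih =>
    intro i₀
    have he : PySem.List.enumerate (c::cs) i₀ = (i₀, c) :: PySem.List.enumerate cs (i₀+1) := rfl
    rw [he, List.filterMap_cons]
    by_cases hg : g i₀
    · simp only [hg, if_true, pvF, Bool.not_true, Bool.false_eq_true, if_false, List.nil_append]
      exact ih (i₀+1)
    · have hg' : g i₀ = false := by simpa using hg
      simp only [hg', Bool.false_eq_true, if_false, pvF, Bool.not_false, if_true, List.singleton_append]
      rw [ih (i₀+1)]

theorem removed_mem (n : Int) (L : List (Int × Int)) :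
    ∀ (st : PySem.Set Int) (i : Int),
      i ∈ L.foldl (fun st p => PySem.Set.update st (PySem.List.pyRange (max p.1 0) (min p.2 n))) st
      ↔ i ∈ st ∨ ∃ p ∈ L, max p.1 0 ≤ i ∧ i < min p.2 n := by
  induction L with
  | nil => intro st i; simp
  | cons p r ih =>
    intro st i
    simp only [List.foldl_cons]
    rw [ih]
    rw [PySem.Set.mem_update]
    constructor
    · rintro (( h | h) | h)
      · exact Or.inl h
      · exact Or.inr ⟨p, List.mem_cons_self .., PySem.List.mem_pyRange_one.mp h⟩
      · rcases h with ⟨q, hq, hb⟩; exact Or.inr ⟨q, List.mem_cons_of_mem _ hq, hb⟩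
    · rintro (h | ⟨q, hq, hb⟩)
      · exact Or.inl (Or.inl h)
      · rcases List.mem_cons.mp hq with rfl | hq'
        · exact Or.inl (Or.inr (PySem.List.mem_pyRange_one.mpr hb))
        · exact Or.inr ⟨q, hq', hb⟩

theorem merge_eq (ts : List Char) :
    ∀ (sp : List (Int × Int)) (le : Int), 0 ≤ le →
      sp.Pairwise (fun a b => a.1 ≤ b.1) → pvND (ts.length : Int) le sp →
      rpSpec ts le sp = pvF (fun i => decide (le ≤ i) && !covB sp i) 0 ts := by
  intro sp
  induction sp with
  | nil =>
    intro le hle _ _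
    simp only [rpSpec]
    have h1 : pvF (fun i => decide (le ≤ i) && !covB [] i) 0 ts = pvF (fun i => decide (le ≤ i)) 0 ts := by
      apply pvF_congr; intro i _ _; simp [covB]
    rw [h1, pvF_ge]
    congr 1; omega
  | cons p r ih =>
    intro le hle hpair hnd
    obtain ⟨s, e⟩ := p
    rw [List.pairwise_cons] at hpair
    obtain ⟨hhead, hr⟩ := hpair
    obtain ⟨h1, h2⟩ := hnd
    simp only at h1
    have hle' : (0:Int) ≤ max le e := by omega
    simp only [rpSpec]
    rw [ih (max le e) hle' hr h2]
    by_cases hls : le < s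
    · -- slice as pvF
      have hslice : PySem.List.slice ts (some le) (some s)
          = pvF (fun i => decide (le ≤ i) && decide (i < s)) 0 ts := by
        rw [PySem.List.slice_toNat ts hle (by omega), pvF_window]
        have e1 : s.toNat - le.toNat = (s - max le 0).toNat := by omega
        have e2 : le.toNat = (le - 0).toNat := by omega
        rw [e1, e2]
      rw [if_pos hls, hslice]
      have hstep1 : pvF (fun i => decide (le ≤ i) && decide (i < s)) 0 ts
          = pvF (fun i => decide (le ≤ i) && decide (i < min s (ts.length : Int))) 0 ts := by
        apply pvF_congr; intro i h0 hlen
        simp only at hlen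
        by_cases hli : le ≤ i
        · simp only [hli, decide_true, Bool.true_and, decide_eq_decide]; omega
        · simp [hli]
      rw [hstep1]
      rw [pvF_split _ _ (min s (ts.length : Int)) ts ?h1 ?h2]
      case h1 =>
        intro i hi
        simp only [Bool.and_eq_true, decide_eq_true_eq] at hi
        exact hi.2
      case h2 =>
        intro i hi
        simp only [Bool.and_eq_true, decide_eq_true_eq] at hi
        omega
      apply pvF_congr
      intro i h0 hlen
      simp only at hlen
      have hcc : covB ((s,e) :: r) i = ((decide (s ≤ i) && decide (i < e)) || covB r i) := by
        simp [covB]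
      rw [hcc]
      cases hcov : covB r i
      · simp only [Bool.or_false, Bool.not_false, Bool.and_true]
        by_cases hli : le ≤ i
        · simp only [hli, decide_true, Bool.true_and]
          rw [Bool.eq_iff_iff]
          simp only [Bool.or_eq_true, decide_eq_true_eq,
            Bool.not_eq_true', Bool.and_eq_false_iff, decide_eq_false_iff_not]
          omega
        · simp [hli]
      · have hsi : s ≤ i := by
          rw [covB, List.any_eq_true] at hcov
          obtain ⟨q, hq, hqc⟩ := hcov
          simp only [Bool.and_eq_true, decide_eq_true_eq] at hqc
          have := hhead q hq
          omega
        simp only [Bool.or_true, Bool.not_true, Bool.and_false, Bool.or_false]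
        have : ¬ (i < min s (ts.length : Int)) := by omega
        simp [this]
    · rw [if_neg hls, List.nil_append]
      apply pvF_congr
      intro i h0 hlen
      simp only at hlen
      have hcc : covB ((s,e) :: r) i = ((decide (s ≤ i) && decide (i < e)) || covB r i) := by
        simp [covB]
      rw [hcc]
      cases hcov : covB r i
      · simp only [Bool.or_false, Bool.not_false, Bool.and_true]
        rw [Bool.eq_iff_iff]
        simp only [Bool.and_eq_true, decide_eq_true_eq, Bool.not_eq_true',
          Bool.and_eq_false_iff, decide_eq_false_iff_not]
        omega
      · simp

theorem alt_char (text : String) (positions : List (Int × Int)) :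
    remove_positions_py_alt text positions
      = String.ofList (pvF (fun i => decide ((0:Int) ≤ i) && !covB positions i) 0 text.toList) := by
  unfold remove_positions_py_alt
  simp only []
  rw [enum_filterMap]
  congr 1
  apply pvF_congr
  intro i h0 hlen
  simp only at hlen
  have hmem : PySem.Set.contains (positions.foldl
      (fun st p => PySem.Set.update st (PySem.List.pyRange (max p.1 0) (min p.2 (text.toList.length : Int)))) PySem.Set.empty) i = covB positions i := by
    rw [Bool.eq_iff_iff, PySem.Set.contains_iff, removed_mem]
    simp only [covB, List.any_eq_true, Bool.and_eq_true, decide_eq_true_eq]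
    constructor
    · rintro (h | ⟨p, hp, hb⟩)
      · exact absurd h (by simp [PySem.Set.empty])
      · exact ⟨p, hp, by omega⟩
    · rintro ⟨p, hp, hb⟩
      exact Or.inr ⟨p, hp, by omega⟩
  rw [hmem]
  have : decide ((0:Int) ≤ i) = true := by simpa using h0
  rw [this, Bool.true_and]

theorem nd_decomp (n : Int) (sp : List (Int × Int)) :
    ∀ (le : Int), ¬ pvND n le sp → ∃ u p v, sp = u ++ p :: v ∧ max (maxE le u) p.2 < min p.1 n := by
  induction sp with
  | nil => intro le h; exact absurd trivial h
  | cons q r ih =>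
    intro le h
    by_cases h1 : min q.1 n ≤ max le q.2
    · have h2 : ¬ pvND n (max le q.2) r := fun hr => h ⟨h1, hr⟩
      obtain ⟨u, p, v, rfl, hlt⟩ := ih (max le q.2) h2
      exact ⟨q :: u, p, v, rfl, by simpa [maxE] using hlt⟩
    · exact ⟨[], q, r, rfl, by simp [maxE]; omega⟩

theorem ins_filter (s : Int) (x : Int × Int) (acc : List (Int × Int))
    (h : acc.Pairwise (fun a b => a.1 ≤ b.1)) :
    (PySem.List.insertBy (fun a b => decide (a.1 < b.1)) x acc).filter (fun q => decide (q.1 = s))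
      = if x.1 = s then acc.filter (fun q => decide (q.1 = s)) ++ [x]
        else acc.filter (fun q => decide (q.1 = s)) := by
  induction acc with
  | nil =>
    have : PySem.List.insertBy (fun a b => decide (a.1 < b.1)) x [] = [x] := rfl
    rw [this]
    by_cases hx : x.1 = s <;> simp [hx]
  | cons y t ih =>
    rw [List.pairwise_cons] at h
    obtain ⟨hy, ht⟩ := h
    have hstep : PySem.List.insertBy (fun a b => decide (a.1 < b.1)) x (y :: t)
        = if decide (x.1 < y.1) then x :: y :: t else y :: PySem.List.insertBy (fun a b => decide (a.1 < b.1)) x t := rfl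
    rw [hstep]
    by_cases hlt : x.1 < y.1
    · simp only [hlt, decide_true, if_true]
      by_cases hx : x.1 = s
      · have hys : ∀ z ∈ y :: t, ¬ ((fun q => decide (q.1 = s)) z = true) := by
          intro z hz
          simp only [decide_eq_true_eq]
          rcases List.mem_cons.mp hz with rfl | hz'
          · omega
          · have := hy z hz'; omega
        have hnil : (y :: t).filter (fun q => decide (q.1 = s)) = [] := by
          rw [List.filter_eq_nil_iff]
          intro a ha
          simpa using hys a ha
        rw [if_pos hx, List.filter_cons_of_pos (by simpa using hx), hnil]
        simp
      · rw [if_neg hx, List.filter_cons_of_neg (by simpa using hx)]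
    · simp only [hlt, decide_false, if_false, Bool.false_eq_true]
      by_cases hys : y.1 = s
      · rw [List.filter_cons_of_pos (by simpa using hys), List.filter_cons_of_pos (by simpa using hys), ih ht]
        by_cases hx : x.1 = s <;> simp [hx]
      · rw [List.filter_cons_of_neg (by simpa using hys), List.filter_cons_of_neg (by simpa using hys), ih ht]

theorem stable_filter (xs : List (Int × Int)) (s : Int) :
    (PySem.List.sorted xs (fun q => q.1) false).filter (fun q => decide (q.1 = s))
      = xs.filter (fun q => decide (q.1 = s)) := by
  induction xs using List.reverseRecOn with
  | nil => rfl
  | append_singleton xs x ih =>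
    rw [PySem.List.sorted_eq_foldl_insertBy, List.foldl_append, List.foldl_cons, List.foldl_nil,
      ← PySem.List.sorted_eq_foldl_insertBy]
    rw [ins_filter s x _ (PySem.List.sorted_pairwise xs (fun q => q.1)), List.filter_append, ih]
    by_cases hx : x.1 = s <;> simp [hx]

theorem zipIdx_snd_ge (l : List (Int × Int)) :
    ∀ (k : Nat) (qj : (Int × Int) × Nat), qj ∈ l.zipIdx k → k ≤ qj.2 := by
  induction l with
  | nil => intro k qj h; simp at h
  | cons y t ih =>
    intro k qj h
    rw [List.zipIdx_cons] at h
    rcases List.mem_cons.mp h with rfl | h'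
    · simp
    · have := ih (k+1) qj h'; omega

theorem head_filter_zipIdx (q : (Int × Int) → Bool) (l : List (Int × Int)) :
    ∀ (k : Nat) (x : Int × Int) (xs : List (Int × Int)), l.filter q = x :: xs →
      ∃ pi ∈ l.zipIdx k, pi.1 = x ∧ ∀ qj ∈ l.zipIdx k, qj.2 < pi.2 → q qj.1 = false := by
  induction l with
  | nil => intro k x xs h; simp at h
  | cons y t ih =>
    intro k x xs h
    by_cases hq : q y = true
    · rw [List.filter_cons_of_pos hq] at h
      obtain ⟨rfl, -⟩ := List.cons.inj h
      refine ⟨(y, k), by simp [List.zipIdx_cons], rfl, ?_⟩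
      intro qj hqj hlt
      rw [List.zipIdx_cons] at hqj
      rcases List.mem_cons.mp hqj with rfl | h'
      · omega
      · have := zipIdx_snd_ge t (k+1) qj h'
        omega
    · have hq' : q y = false := by simpa using hq
      rw [List.filter_cons_of_neg (by simp [hq'])] at h
      obtain ⟨pi, hpi, hpe, hall⟩ := ih (k+1) x xs h
      refine ⟨pi, by simp [List.zipIdx_cons, hpi], hpe, ?_⟩
      intro qj hqj hlt
      rw [List.zipIdx_cons] at hqj
      rcases List.mem_cons.mp hqj with rfl | h'
      · exact hq'
      · exact hall qj h' hlt

theorem foldl_max_perm (l l' : List Int) (h : l.Perm l') (a : Int) :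
    l.foldl max a = l'.foldl max a := by
  apply le_antisymm
  · rcases PySem.List.foldl_max_mem l a with he | hm
    · rw [he]; exact (PySem.List.le_foldl_max l' a).1
    · exact (PySem.List.le_foldl_max l' a).2 _ (h.mem_iff.mp hm)
  · rcases PySem.List.foldl_max_mem l' a with he | hm
    · rw [he]; exact (PySem.List.le_foldl_max l a).1
    · exact (PySem.List.le_foldl_max l a).2 _ (h.mem_iff.mpr hm)

theorem notND_to_D (text : String) (positions : List (Int × Int))
    (h : ¬ pvND (text.toList.length : Int) 0 (PySem.List.sorted positions (fun x => x.1) false)) :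
    D_remove_positions_py text positions := by
  set n : Int := (text.toList.length : Int) with hn
  set sp := PySem.List.sorted positions (fun x => x.1) false with hsp
  obtain ⟨u, p, v, hdec, hlt⟩ := nd_decomp n sp 0 h
  set s := p.1 with hs
  -- sortedness of sp
  have hpair : sp.Pairwise (fun a b => a.1 ≤ b.1) := PySem.List.sorted_pairwise positions (fun q => q.1)
  have hperm : sp.Perm positions := PySem.List.sorted_perm positions (fun x => x.1) false
  -- all of v has key ≥ s, all of u has key ≤ s
  rw [hdec] at hpair
  have hv : ∀ qv ∈ v, s ≤ qv.1 := by
    have := (List.pairwise_append.mp hpair).2.1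
    rw [List.pairwise_cons] at this
    exact fun qv hqv => this.1 qv hqv
  -- the group filter
  have hgs : sp.filter (fun q => decide (q.1 = s)) = positions.filter (fun q => decide (q.1 = s)) :=
    stable_filter positions s
  have hgdec : sp.filter (fun q => decide (q.1 = s))
      = u.filter (fun q => decide (q.1 = s)) ++ p :: v.filter (fun q => decide (q.1 = s)) := by
    rw [hdec, List.filter_append, List.filter_cons_of_pos (by simp [hs])]
  -- head x₀ of the group, with x₀.1 = s and x₀.2 bounded
  obtain ⟨x₀, rest, hghead, hx₀s, hx₀e⟩ :
      ∃ x₀ rest, positions.filter (fun q => decide (q.1 = s)) = x₀ :: rest ∧ x₀.1 = s ∧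
        x₀.2 ≤ max (maxE 0 u) p.2 := by
    rw [← hgs, hgdec]
    cases hu : u.filter (fun q => decide (q.1 = s)) with
    | nil =>
      exact ⟨p, List.filter (fun q => decide (q.1 = s)) v, by simp, hs.symm, le_max_right _ _⟩
    | cons a t =>
      have ha : a ∈ u := by
        have : a ∈ u.filter (fun q => decide (q.1 = s)) := by rw [hu]; simp
        exact List.mem_of_mem_filter this
      have has : a.1 = s := by
        have : a ∈ u.filter (fun q => decide (q.1 = s)) := by rw [hu]; simp
        simpa using List.of_mem_filter this
      refine ⟨a, t ++ p :: List.filter (fun q => decide (q.1 = s)) v, by simp, has, ?_⟩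
      have := (PySem.List.le_foldl_max_int u (fun q => q.2) 0).2 a ha
      simp only [maxE]
      omega
  -- prevE bound
  have hprev : ((positions.filter (fun q => decide (q.1 < s))).map (fun q => q.2)).foldl max 0
      ≤ maxE 0 u := by
    have hpf : (positions.filter (fun q => decide (q.1 < s))).Perm (u.filter (fun q => decide (q.1 < s))) := by
      have h1 : (sp.filter (fun q => decide (q.1 < s))).Perm (positions.filter (fun q => decide (q.1 < s))) :=
        hperm.filter _
      have h2 : sp.filter (fun q => decide (q.1 < s)) = u.filter (fun q => decide (q.1 < s)) := by
        rw [hdec, List.filter_append]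
        have : (p :: v).filter (fun q => decide (q.1 < s)) = [] := by
          rw [List.filter_eq_nil_iff]
          intro a ha
          rcases List.mem_cons.mp ha with rfl | ha'
          · simp [hs]
          · have := hv a ha'; simp; omega
        rw [this, List.append_nil]
      rw [← h2]
      exact h1.symm
    rw [foldl_max_perm _ _ (hpf.map (fun q => q.2)) 0]
    rcases PySem.List.foldl_max_mem ((u.filter (fun q => decide (q.1 < s))).map (fun q => q.2)) 0 with he | hm
    · rw [he]; exact (PySem.List.le_foldl_max_int u (fun q => q.2) 0).1
    · obtain ⟨a, ha, heq⟩ := List.mem_map.mp hm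
      rw [← heq]
      exact (PySem.List.le_foldl_max_int u (fun q => q.2) 0).2 a (List.mem_of_mem_filter ha)
  -- the zipIdx witness
  obtain ⟨pi, hpimem, hpix, hpiall⟩ :=
    head_filter_zipIdx (fun q => decide (q.1 = s)) positions 0 x₀ rest hghead
  refine ⟨pi, hpimem, ?_, ?_⟩
  · intro qj hqj hlt'
    have := hpiall qj hqj hlt'
    simp only [decide_eq_false_iff_not] at this
    rw [hpix, hx₀s]
    exact this
  · rw [hpix, hx₀s]
    have : x₀.2 ≤ max (maxE 0 u) p.2 := hx₀e
    omega

theorem unchanged_of_notD (text : String) (positions : List (Int × Int))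
    (hD : ¬ D_remove_positions_py text positions) :
    remove_positions_py text positions = remove_positions_py_alt text positions := by
  have hnd : pvND (text.toList.length : Int) 0 (PySem.List.sorted positions (fun x => x.1) false) := by
    by_contra hc
    exact hD (notND_to_D text positions hc)
  have hpair : (PySem.List.sorted positions (fun x => x.1) false).Pairwise (fun a b => a.1 ≤ b.1) :=
    PySem.List.sorted_pairwise positions (fun q => q.1)
  rw [alt_char]
  by_cases hp : positions = []
  · subst hp
    rw [remove_positions_py]
    simp only [reduceIte]
    have h1 : pvF (fun i => decide ((0:Int) ≤ i) && !covB [] i) 0 text.toList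
        = pvF (fun i => decide ((0:Int) ≤ i)) 0 text.toList := by
      apply pvF_congr; intro i _ _; simp [covB]
    rw [h1, pvF_ge]
    simp
  · rw [remove_positions_py]
    simp only [if_neg hp]
    have hA := rpA text.toList (PySem.List.sorted positions (fun x => x.1) false) [] 0 le_rfl
    simp only [List.flatten_nil, List.nil_append] at hA
    rw [hA]
    rw [merge_eq text.toList _ 0 le_rfl hpair hnd]
    congr 1
    apply pvF_congr
    intro i _ _
    have : covB (PySem.List.sorted positions (fun x => x.1) false) i = covB positions i := by
      simp only [covB]
      exact (PySem.List.sorted_perm positions (fun x => x.1) false).any_eq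
    rw [this]

-- ===== VERDICT =====
theorem remove_positions_py_spec : Claim_unchanged_remove_positions_py := by
  intro text positions _
  unfold Spec_remove_positions_py
  intro hD
  exact unchanged_of_notD text positions hD

theorem remove_positions_py_changed : Claim_changed_remove_positions_py := by
  unfold Claim_changed_remove_positions_py; decide
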